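-- pv_equiv track=rewrite | github.com/ansible-collections/community.general | plugins/modules/dnf_config_manager.py | pack_repo_states_for_return
-- ===== SOURCE A (Python) =====
-- def pack_repo_states_for_return(states):
--     enabled = []
--     disabled = []
--     for repo_id in states:
--         if states[repo_id] == "enabled":
--             enabled.append(repo_id)
--         else:
--             disabled.append(repo_id)
--
--     # Sort for consistent results
--     enabled.sort()
--     disabled.sort()
--
--     return {"enabled": enabled, "disabled": disabled}
-- ===== SOURCE B (Python) =====
-- def _insort(lst, x):
--     # binary-search the insertion point in the already-sorted list, then insert there
--     lo, hi = 0, len(lst)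
--     while lo < hi:
--         mid = (lo + hi) // 2
--         if lst[mid] < x:
--             lo = mid + 1
--         else:
--             hi = mid
--     lst.insert(lo, x)
--
--
-- def pack_repo_states_for_return(states):
--     enabled = []
--     disabled = []
--     for repo_id in states:
--         _insort(enabled if states[repo_id] == "enabled" else disabled, repo_id)
--     return {"enabled": enabled, "disabled": disabled}
-- ===== Notes on version B (the rewrite author's own statement) =====
-- stated objective: alternative
-- what changed: B never calls sort: in one pass it binary-searches each repo id's ordered position and inserts it there in the proper bucket (online sorted insertion), whereas A appends into two buckets and sorts each afterwards.
import Mathlib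
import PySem

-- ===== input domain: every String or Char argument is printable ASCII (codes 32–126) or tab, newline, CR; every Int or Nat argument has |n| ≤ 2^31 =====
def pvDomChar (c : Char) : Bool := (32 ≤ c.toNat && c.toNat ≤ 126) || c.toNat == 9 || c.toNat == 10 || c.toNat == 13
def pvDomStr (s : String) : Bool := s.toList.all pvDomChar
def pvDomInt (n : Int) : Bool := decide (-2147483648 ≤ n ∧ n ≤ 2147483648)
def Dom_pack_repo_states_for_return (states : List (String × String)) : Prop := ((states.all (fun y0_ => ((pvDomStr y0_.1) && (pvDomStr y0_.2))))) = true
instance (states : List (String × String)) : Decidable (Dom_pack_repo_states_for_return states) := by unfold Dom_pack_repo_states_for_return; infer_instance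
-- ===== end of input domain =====

-- B drops A's post-hoc sort calls: one pass binary-searches each key's ordered position
-- and inserts it there in the proper bucket (online sorted insertion); alternative, not faster.

-- ===== PORT A =====
def pack_repo_states_for_return (states : List (String × String)) : List (String × List String) :=
  let d := PySem.Dict.ofList states
  let p := d.keys.foldl
    (fun (acc : List String × List String) repo_id =>
      if d.getD repo_id "" == "enabled" then (acc.1 ++ [repo_id], acc.2)
      else (acc.1, acc.2 ++ [repo_id])) ([], [])
  [("enabled", PySem.List.sorted p.1 (fun x => x) false),
   ("disabled", PySem.List.sorted p.2 (fun x => x) false)]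

-- ===== PORT B =====
-- the while-loop of _insort: binary search for the insertion point (lst[mid] is always
-- in range here since lo < hi ≤ len lst, so getElem! is exact)
def pvBisectLoop (l : List String) (x : String) (lo hi : Nat) : Nat :=
  if h : lo < hi then
    let mid := (lo + hi) / 2
    if l[mid]! < x then pvBisectLoop l x (mid + 1) hi else pvBisectLoop l x lo mid
  else lo
termination_by hi - lo
decreasing_by all_goals omega

-- _insort(lst, x): lst.insert(lo, x) at the found position
def pvInsort (lst : List String) (x : String) : List String :=
  PySem.List.insert lst ((pvBisectLoop lst x 0 lst.length : Nat) : Int) x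

def pack_repo_states_for_return_alt (states : List (String × String)) : List (String × List String) :=
  let d := PySem.Dict.ofList states
  let p := d.keys.foldl
    (fun (acc : List String × List String) repo_id =>
      if d.getD repo_id "" == "enabled" then (pvInsort acc.1 repo_id, acc.2)
      else (acc.1, pvInsort acc.2 repo_id)) ([], [])
  [("enabled", p.1), ("disabled", p.2)]

-- ===== PRECONDITION & SPEC =====
def Spec_pack_repo_states_for_return (states : List (String × String)) (out : List (String × List String)) : Prop := out = pack_repo_states_for_return_alt states
instance (states : List (String × String)) (out : List (String × List String)) : Decidable (Spec_pack_repo_states_for_return states out) := by unfold Spec_pack_repo_states_for_return; infer_instance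

-- ===== CLAIM (what is proved, stated in full; the proofs are below) =====
def Claim_equal_pack_repo_states_for_return : Prop := ∀ (states : List (String × String)), Dom_pack_repo_states_for_return states → Spec_pack_repo_states_for_return states (pack_repo_states_for_return states)

-- ===== LEMMAS AND PROOFS =====

-- sorted lists are monotone in getElem!
theorem pv_sorted_le (l : List String) (hs : l.Pairwise (· ≤ ·)) (i j : Nat)
    (hij : i ≤ j) (hj : j < l.length) : l[i]! ≤ l[j]! := by
  rw [getElem!_pos l i (lt_of_le_of_lt hij hj), getElem!_pos l j hj]
  rcases lt_or_eq_of_le hij with h | h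
  · exact List.pairwise_iff_getElem.mp hs i j (lt_of_le_of_lt hij hj) hj h
  · subst h; exact le_refl _

-- what the binary search returns: every element before is < x, every element from it on is ≥ x
theorem pvBisectLoop_spec (l : List String) (x : String) (hs : l.Pairwise (· ≤ ·)) :
    ∀ n lo hi, hi - lo ≤ n → hi ≤ l.length → lo ≤ hi →
      (∀ j, j < lo → l[j]! < x) → (∀ j, hi ≤ j → j < l.length → x ≤ l[j]!) →
      (pvBisectLoop l x lo hi ≤ l.length ∧
       (∀ j, j < pvBisectLoop l x lo hi → l[j]! < x) ∧
       (∀ j, pvBisectLoop l x lo hi ≤ j → j < l.length → x ≤ l[j]!)) := by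
  intro n
  induction n with
  | zero =>
    intro lo hi hn hhi hlohi hlo hge
    have : ¬ lo < hi := by omega
    rw [pvBisectLoop, dif_neg this]
    exact ⟨by omega, hlo, fun j hj hjl => hge j (by omega) hjl⟩
  | succ n ih =>
    intro lo hi hn hhi hlohi hlo hge
    by_cases h : lo < hi
    · rw [pvBisectLoop, dif_pos h]
      simp only
      by_cases hm : l[(lo + hi) / 2]! < x
      · rw [if_pos hm]
        refine ih ((lo + hi) / 2 + 1) hi (by omega) hhi (by omega) ?_ hge
        intro j hj
        rcases Nat.lt_or_ge j lo with hjlo | hjlo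
        · exact hlo j hjlo
        · exact lt_of_le_of_lt (pv_sorted_le l hs j ((lo + hi) / 2) (by omega) (by omega)) hm
      · rw [if_neg hm]
        refine ih lo ((lo + hi) / 2) (by omega) (by omega) (by omega) hlo ?_
        intro j hj hjl
        exact le_trans (not_lt.mp hm) (pv_sorted_le l hs ((lo + hi) / 2) j hj hjl)
    · rw [pvBisectLoop, dif_neg h]
      exact ⟨by omega, hlo, fun j hj hjl => hge j (by omega) hjl⟩

-- Python's lst.insert at a nonnegative in-range index is take/cons/drop
theorem pv_insert_nat {α : Type} (xs : List α) (r : Nat) (x : α) (h : r ≤ xs.length) :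
    PySem.List.insert xs (r : Int) x = xs.take r ++ x :: xs.drop r := by
  have h1 : ¬ ((r : Int) < 0) := by omega
  have h2 : min (r : Int) (xs.length : Int) = (r : Int) := by omega
  simp [PySem.List.insert, PySem.List.sliceIndices, h1, h2]

-- inserting at a position with the bisect properties is Mathlib's orderedInsert
theorem pv_takeDrop_eq_orderedInsert :
    ∀ (l : List String) (r : Nat) (x : String), r ≤ l.length →
      (∀ j, j < r → l[j]! < x) → (∀ j, r ≤ j → j < l.length → x ≤ l[j]!) →
      l.take r ++ x :: l.drop r = List.orderedInsert (· ≤ ·) x l := by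
  intro l
  induction l with
  | nil =>
    intro r x hr _ _
    have : r = 0 := by simpa using hr
    subst this
    rfl
  | cons y ys ih =>
    intro r x hr hlo hge
    cases r with
    | zero =>
      have hxy : x ≤ y := by simpa using hge 0 (by omega) (by simp)
      simp [List.orderedInsert, hxy]
    | succ k =>
      have hyx : y < x := by simpa using hlo 0 (by omega)
      rw [List.orderedInsert, if_neg (not_le.mpr hyx)]
      simp only [List.take_succ_cons, List.drop_succ_cons, List.cons_append, List.cons.injEq]
      refine ⟨trivial, ih k x (by simpa using hr) ?_ ?_⟩
      · intro j hj; simpa using hlo (j + 1) (by omega)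
      · intro j hj hjl; simpa using hge (j + 1) (by omega) (by simpa using Nat.succ_lt_succ hjl)

-- on a sorted accumulator _insort is orderedInsert
theorem pvInsort_eq_orderedInsert (acc : List String) (x : String)
    (h : acc.Pairwise (· ≤ ·)) : pvInsort acc x = List.orderedInsert (· ≤ ·) x acc := by
  obtain ⟨h1, h2, h3⟩ := pvBisectLoop_spec acc x h acc.length 0 acc.length (by omega)
    le_rfl (by omega) (fun j hj => absurd hj (by omega)) (fun j hj hjl => absurd hjl (by omega))
  unfold pvInsort
  rw [pv_insert_nat _ _ _ h1]
  exact pv_takeDrop_eq_orderedInsert acc _ x h1 h2 h3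

-- A's pair-accumulator loop is a pair of filters.
theorem pv_pair_fold_app (q : String → Bool) (l : List String) (acc : List String × List String) :
    l.foldl (fun (acc : List String × List String) r =>
      if q r then (acc.1 ++ [r], acc.2) else (acc.1, acc.2 ++ [r])) acc
    = (acc.1 ++ l.filter q, acc.2 ++ l.filter (fun r => !q r)) := by
  induction l generalizing acc with
  | nil => simp
  | cons x xs ih =>
    by_cases h : q x = true <;> simp [List.foldl_cons, h, ih]

-- B's pair-accumulator loop is a pair of independent insort folds over the filters.
theorem pv_pair_fold_ins (q : String → Bool) (l : List String) (acc : List String × List String) :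
    l.foldl (fun (acc : List String × List String) r =>
      if q r then (pvInsort acc.1 r, acc.2) else (acc.1, pvInsort acc.2 r)) acc
    = ((l.filter q).foldl pvInsort acc.1, (l.filter (fun r => !q r)).foldl pvInsort acc.2) := by
  induction l generalizing acc with
  | nil => simp
  | cons x xs ih =>
    by_cases h : q x = true <;> simp [List.foldl_cons, h, ih]

theorem pv_foldl_ord_perm (xs : List String) (acc : List String) :
    (xs.foldl (fun l x => List.orderedInsert (· ≤ ·) x l) acc).Perm (acc ++ xs) := by
  induction xs generalizing acc with
  | nil => simp
  | cons x t ih =>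
    have h1 : ((x :: t).foldl (fun l x => List.orderedInsert (· ≤ ·) x l) acc).Perm
        (List.orderedInsert (· ≤ ·) x acc ++ t) := ih _
    have h2 : (List.orderedInsert (· ≤ ·) x acc ++ t).Perm ((x :: acc) ++ t) :=
      List.Perm.append_right t (List.perm_orderedInsert _ x acc)
    have h3 : ((x :: acc) ++ t).Perm (acc ++ x :: t) := by
      simpa using (List.perm_middle (a := x) (l₁ := acc) (l₂ := t)).symm
    exact (h1.trans h2).trans h3

theorem pv_foldl_ord_sorted (xs : List String) (acc : List String)
    (h : acc.Pairwise (· ≤ ·)) :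
    (xs.foldl (fun l x => List.orderedInsert (· ≤ ·) x l) acc).Pairwise (· ≤ ·) := by
  induction xs generalizing acc with
  | nil => exact h
  | cons x t ih => exact ih _ (List.Pairwise.orderedInsert x acc h)

-- folding _insort from a sorted accumulator is folding orderedInsert
theorem pv_foldl_insort_eq_ord (xs : List String) (acc : List String)
    (h : acc.Pairwise (· ≤ ·)) :
    xs.foldl pvInsort acc = xs.foldl (fun l x => List.orderedInsert (· ≤ ·) x l) acc := by
  induction xs generalizing acc with
  | nil => rfl
  | cons x t ih =>
    simp only [List.foldl_cons, pvInsort_eq_orderedInsert acc x h]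
    exact ih _ (List.Pairwise.orderedInsert x acc h)

-- folding _insort over a duplicate-free list produces exactly Python's sorted list
theorem pv_foldl_insort_eq_sorted (xs : List String) (hnd : xs.Nodup) :
    PySem.List.sorted xs (fun x => x) false = xs.foldl pvInsort [] := by
  rw [pv_foldl_insort_eq_ord xs [] List.Pairwise.nil]
  apply PySem.List.sorted_eq_of_perm_of_pairwise_lt
  · simpa using pv_foldl_ord_perm xs []
  · have hperm := pv_foldl_ord_perm xs []
    have hnd' : (xs.foldl (fun l x => List.orderedInsert (· ≤ ·) x l) []).Nodup :=
      hperm.nodup_iff.mpr (by simpa using hnd)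
    have hle := pv_foldl_ord_sorted xs [] List.Pairwise.nil
    exact (hle.and hnd').imp (fun h => lt_of_le_of_ne h.1 h.2)

-- ===== VERDICT (by name: the statement is the Claim_ definition above) =====
theorem pack_repo_states_for_return_spec : Claim_equal_pack_repo_states_for_return := by
  intro states _
  unfold Spec_pack_repo_states_for_return pack_repo_states_for_return pack_repo_states_for_return_alt
  have hnd := PySem.Dict.nodup_keys_ofList (κ := String) (ν := String) states
  simp only [pv_pair_fold_app, pv_pair_fold_ins, List.nil_append]
  rw [pv_foldl_insort_eq_sorted _ (hnd.filter _), pv_foldl_insort_eq_sorted _ (hnd.filter _)]
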